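-- pv_equiv track=rewrite | github.com/AmarKanth/machine_learning | 02. probability/02. combinatorics.py | count_even_sum_subsets
-- ===== SOURCE A (Python) =====
-- from itertools import combinations
--
-- def count_even_sum_subsets(elements):
--     MOD = 10**9 + 7
--     even_sum_count = 0
--
--     for r in range(1, len(elements) + 1):
--         for combo in combinations(elements, r):
--             if sum(combo) % 2 == 0:
--                 even_sum_count += 1
--
--     return even_sum_count % MOD
-- ===== SOURCE B (Python) =====
-- def count_even_sum_subsets(elements):
--     MOD = 10**9 + 7
--     n = len(elements)
--     if any(x % 2 for x in elements):
--         return (pow(2, n - 1, MOD) - 1) % MOD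
--     return (pow(2, n, MOD) - 1) % MOD
-- ===== Notes on version B (the rewrite author's own statement) =====
-- stated objective: faster
-- what changed: Replaced the exponential enumeration of all non-empty subsets by r with the closed form: 2^(n-1)-1 if the list has an odd element, else 2^n-1, computed by modular fast exponentiation.
import Mathlib
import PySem

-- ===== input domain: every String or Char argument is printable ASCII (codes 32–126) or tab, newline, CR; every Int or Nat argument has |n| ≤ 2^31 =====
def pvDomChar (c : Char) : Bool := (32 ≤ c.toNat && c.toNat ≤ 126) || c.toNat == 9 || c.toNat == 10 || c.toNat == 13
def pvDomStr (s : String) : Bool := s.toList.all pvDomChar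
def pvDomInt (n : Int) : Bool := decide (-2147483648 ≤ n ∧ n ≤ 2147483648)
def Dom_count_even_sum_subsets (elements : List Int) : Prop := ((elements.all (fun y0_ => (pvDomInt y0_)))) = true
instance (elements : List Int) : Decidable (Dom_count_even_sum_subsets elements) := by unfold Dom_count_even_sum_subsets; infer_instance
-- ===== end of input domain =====

-- B replaces A's exponential enumeration of all non-empty subsets with the closed form
-- 2^(n-1)-1 (some odd element) / 2^n-1 (all even), via modular exponentiation: asymptotically faster.

-- ===== PORT A =====
def count_even_sum_subsets (elements : List Int) : Int :=
  let MOD : Int := 10 ^ 9 + 7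
  let even_sum_count : Int :=
    (List.range' 1 elements.length).foldl (fun acc r =>
      (PySem.List.combinations elements r).foldl (fun acc combo =>
        if PySem.Int.mod combo.sum 2 == 0 then acc + 1 else acc) acc) 0
  PySem.Int.mod even_sum_count MOD

-- ===== PORT B =====
def count_even_sum_subsets_alt (elements : List Int) : Int :=
  let MOD : Int := 10 ^ 9 + 7
  let n := elements.length
  if elements.any (fun x => PySem.Int.mod x 2 != 0) then
    PySem.Int.mod (PySem.Int.powMod 2 (n - 1) MOD - 1) MOD
  else
    PySem.Int.mod (PySem.Int.powMod 2 n MOD - 1) MOD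

-- ===== PRECONDITION & SPEC =====
def Spec_count_even_sum_subsets (elements : List Int) (out : Int) : Prop := out = count_even_sum_subsets_alt elements
instance (elements : List Int) (out : Int) : Decidable (Spec_count_even_sum_subsets elements out) := by unfold Spec_count_even_sum_subsets; infer_instance

-- ===== CLAIM (what is proved, stated in full; the proofs are below) =====
def Claim_equal_count_even_sum_subsets : Prop := ∀ (elements : List Int), Dom_count_even_sum_subsets elements → Spec_count_even_sum_subsets elements (count_even_sum_subsets elements)

-- ===== LEMMAS AND PROOFS =====

-- number of even-sum (resp. odd-sum) combinations of xs, over all sizes 0..len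
def evenC (xs : List Int) : Nat :=
  ∑ r ∈ Finset.range (xs.length + 1),
    (PySem.List.combinations xs r).countP (fun c => PySem.Int.mod c.sum 2 == 0)

def oddC (xs : List Int) : Nat :=
  ∑ r ∈ Finset.range (xs.length + 1),
    (PySem.List.combinations xs r).countP (fun c => PySem.Int.mod c.sum 2 == 1)

lemma cons_sum (p : List Int → Bool) (x : Int) (t : List Int) :
    ∑ r ∈ Finset.range ((x :: t).length + 1), (PySem.List.combinations (x :: t) r).countP p
    = ∑ r ∈ Finset.range (t.length + 1), (PySem.List.combinations t r).countP (fun c => p (x :: c))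
      + ∑ r ∈ Finset.range (t.length + 1), (PySem.List.combinations t r).countP p := by
  have hB0 : (PySem.List.combinations t 0).countP p = (PySem.List.combinations (x :: t) 0).countP p := by
    rw [PySem.List.combinations_zero, PySem.List.combinations_zero]
  have hBtop : (PySem.List.combinations t (t.length + 1)).countP p = 0 := by
    rw [PySem.List.combinations_eq_nil_of_length_lt t (by omega)]; rfl
  have h1 : ∑ r ∈ Finset.range ((x :: t).length + 1), (PySem.List.combinations (x :: t) r).countP p
      = ∑ i ∈ Finset.range (t.length + 1), (PySem.List.combinations (x :: t) (i + 1)).countP p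
        + (PySem.List.combinations (x :: t) 0).countP p := by
    simpa using Finset.sum_range_succ' (fun r => (PySem.List.combinations (x :: t) r).countP p) (t.length + 1)
  have h2 : ∀ i, (PySem.List.combinations (x :: t) (i + 1)).countP p
      = (PySem.List.combinations t i).countP (fun c => p (x :: c))
        + (PySem.List.combinations t (i + 1)).countP p := by
    intro i
    rw [PySem.List.combinations_cons_succ, List.countP_append, List.countP_map]
    rfl
  have h3 : ∑ i ∈ Finset.range (t.length + 1), (PySem.List.combinations t (i + 1)).countP p
        + (PySem.List.combinations t 0).countP p
      = ∑ r ∈ Finset.range (t.length + 2), (PySem.List.combinations t r).countP p := by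
    simpa using (Finset.sum_range_succ' (fun r => (PySem.List.combinations t r).countP p) (t.length + 1)).symm
  have h4 : ∑ r ∈ Finset.range (t.length + 2), (PySem.List.combinations t r).countP p
      = ∑ r ∈ Finset.range (t.length + 1), (PySem.List.combinations t r).countP p := by
    rw [Finset.sum_range_succ, hBtop]
    simp
  rw [h1]
  have hc0 : (PySem.List.combinations t 0).countP p = if p [] = true then 1 else 0 := by
    rw [PySem.List.combinations_zero]
    simp [List.countP_cons]
  have hcx0 : (PySem.List.combinations (x :: t) 0).countP p = if p [] = true then 1 else 0 := by
    rw [PySem.List.combinations_zero]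
    simp [List.countP_cons]
  rw [hcx0] at h1
  rw [hc0] at h3
  have h5 : ∑ i ∈ Finset.range (t.length + 1), (PySem.List.combinations (x :: t) (i + 1)).countP p
      = ∑ i ∈ Finset.range (t.length + 1), (PySem.List.combinations t i).countP (fun c => p (x :: c))
        + ∑ i ∈ Finset.range (t.length + 1), (PySem.List.combinations t (i + 1)).countP p := by
    rw [← Finset.sum_add_distrib]
    exact Finset.sum_congr rfl (fun i _ => h2 i)
  rw [h4] at h3
  omega

lemma evenC_cons (x : Int) (t : List Int) :
    evenC (x :: t) = (if PySem.Int.mod x 2 == 0 then evenC t else oddC t) + evenC t := by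
  have h := cons_sum (fun c => PySem.Int.mod c.sum 2 == 0) x t
  rw [evenC, h, evenC]
  congr 1
  rcases PySem.Int.mod_two_eq x with hx | hx
  · simp only [hx, BEq.rfl, if_true]
    apply Finset.sum_congr rfl; intro r _
    apply List.countP_congr; intro c _
    have hx' : x % 2 = 0 := by
      rwa [PySem.Int.mod_eq_emod_of_pos (by norm_num)] at hx
    have : PySem.Int.mod (x :: c).sum 2 = PySem.Int.mod c.sum 2 := by
      rw [PySem.Int.mod_eq_emod_of_pos (by norm_num), PySem.Int.mod_eq_emod_of_pos (by norm_num)]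
      simp only [List.sum_cons]
      omega
    rw [this]
  · have hx0 : (PySem.Int.mod x 2 == 0) = false := by rw [hx]; rfl
    simp only [hx0, oddC]
    apply Finset.sum_congr rfl; intro r _
    apply List.countP_congr; intro c _
    have hx' : x % 2 = 1 := by
      rwa [PySem.Int.mod_eq_emod_of_pos (by norm_num)] at hx
    have h2 : PySem.Int.mod (x :: c).sum 2 = 1 - PySem.Int.mod c.sum 2 := by
      rw [PySem.Int.mod_eq_emod_of_pos (by norm_num), PySem.Int.mod_eq_emod_of_pos (by norm_num)]
      simp only [List.sum_cons]
      omega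
    rcases PySem.Int.mod_two_eq c.sum with hc | hc <;> rw [h2, hc] <;> rfl

lemma oddC_cons (x : Int) (t : List Int) :
    oddC (x :: t) = (if PySem.Int.mod x 2 == 0 then oddC t else evenC t) + oddC t := by
  have h := cons_sum (fun c => PySem.Int.mod c.sum 2 == 1) x t
  rw [oddC, h, oddC]
  congr 1
  rcases PySem.Int.mod_two_eq x with hx | hx
  · simp only [hx, BEq.rfl, if_true]
    apply Finset.sum_congr rfl; intro r _
    apply List.countP_congr; intro c _
    have hx' : x % 2 = 0 := by
      rwa [PySem.Int.mod_eq_emod_of_pos (by norm_num)] at hx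
    have : PySem.Int.mod (x :: c).sum 2 = PySem.Int.mod c.sum 2 := by
      rw [PySem.Int.mod_eq_emod_of_pos (by norm_num), PySem.Int.mod_eq_emod_of_pos (by norm_num)]
      simp only [List.sum_cons]
      omega
    rw [this]
  · have hx0 : (PySem.Int.mod x 2 == 0) = false := by rw [hx]; rfl
    simp only [hx0, evenC]
    apply Finset.sum_congr rfl; intro r _
    apply List.countP_congr; intro c _
    have hx' : x % 2 = 1 := by
      rwa [PySem.Int.mod_eq_emod_of_pos (by norm_num)] at hx
    have h2 : PySem.Int.mod (x :: c).sum 2 = 1 - PySem.Int.mod c.sum 2 := by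
      rw [PySem.Int.mod_eq_emod_of_pos (by norm_num), PySem.Int.mod_eq_emod_of_pos (by norm_num)]
      simp only [List.sum_cons]
      omega
    rcases PySem.Int.mod_two_eq c.sum with hc | hc <;> rw [h2, hc] <;> rfl

lemma evenC_oddC (xs : List Int) :
    evenC xs = (if xs.any (fun x => PySem.Int.mod x 2 != 0) then 2 ^ (xs.length - 1) else 2 ^ xs.length)
    ∧ oddC xs = (if xs.any (fun x => PySem.Int.mod x 2 != 0) then 2 ^ (xs.length - 1) else 0) := by
  induction xs with
  | nil => constructor <;> rfl
  | cons x t ih =>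
    obtain ⟨he, ho⟩ := ih
    have hne0 : t.any (fun x => PySem.Int.mod x 2 != 0) = true → 1 ≤ t.length := by
      intro h
      rcases List.any_eq_true.mp h with ⟨a, ha, _⟩
      cases t with
      | nil => cases ha
      | cons b u => simp
    rw [evenC_cons, oddC_cons, he, ho]
    have hpow : ∀ n : Nat, 1 ≤ n → 2 ^ (n - 1) + 2 ^ (n - 1) = 2 ^ n := by
      intro n hn
      conv_rhs => rw [show n = n - 1 + 1 by omega]
      rw [pow_succ]; ring
    rcases PySem.Int.mod_two_eq x with hx | hx
    · have hx0 : (PySem.Int.mod x 2 == 0) = true := by rw [hx]; rfl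
      have hx1 : (PySem.Int.mod x 2 != 0) = false := by rw [hx]; rfl
      simp only [hx0, if_true, List.any_cons, hx1, Bool.false_or, List.length_cons]
      by_cases ht : t.any (fun x => PySem.Int.mod x 2 != 0) = true
      · have h1 := hne0 ht
        simp only [ht, if_true, Nat.add_sub_cancel]
        exact ⟨hpow _ h1, hpow _ h1⟩
      · rw [Bool.not_eq_true] at ht
        simp only [ht, Bool.false_eq_true, if_false]
        exact ⟨by rw [pow_succ]; ring, by trivial⟩
    · have hx0 : (PySem.Int.mod x 2 == 0) = false := by rw [hx]; rfl
      have hx1 : (PySem.Int.mod x 2 != 0) = true := by rw [hx]; rfl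
      simp only [hx0, Bool.false_eq_true, if_false, List.any_cons, hx1, Bool.true_or, if_true,
        List.length_cons, Nat.add_sub_cancel]
      by_cases ht : t.any (fun x => PySem.Int.mod x 2 != 0) = true
      · have h1 := hne0 ht
        simp only [ht, if_true]
        exact ⟨hpow _ h1, hpow _ h1⟩
      · rw [Bool.not_eq_true] at ht
        simp only [ht, Bool.false_eq_true, if_false]
        exact ⟨by ring, by ring⟩

-- inner loop of A counts the even-sum combos
lemma inner_foldl (l : List (List Int)) (a : Int) :
    l.foldl (fun acc combo => if PySem.Int.mod combo.sum 2 == 0 then acc + 1 else acc) a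
    = a + ((l.countP (fun c => PySem.Int.mod c.sum 2 == 0) : Nat) : Int) := by
  induction l generalizing a with
  | nil => simp
  | cons c l ih =>
    rw [List.foldl_cons, List.countP_cons, ih]
    by_cases h : (PySem.Int.mod c.sum 2 == 0) = true
    · rw [if_pos h, if_pos h]; push_cast; ring
    · rw [if_neg h, if_neg h]; push_cast; ring

-- outer loop of A sums the per-size counts
lemma outer_foldl (xs : List Int) : ∀ (n : Nat) (a : Int),
    (List.range' 1 n).foldl (fun acc r =>
      (PySem.List.combinations xs r).foldl (fun acc combo =>
        if PySem.Int.mod combo.sum 2 == 0 then acc + 1 else acc) acc) a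
    = a + ((∑ r ∈ Finset.range n,
        (PySem.List.combinations xs (r + 1)).countP (fun c => PySem.Int.mod c.sum 2 == 0) : Nat) : Int) := by
  intro n
  induction n with
  | zero => intro a; simp
  | succ n ih =>
    intro a
    rw [List.range'_1_concat, List.foldl_append, ih, List.foldl_cons, List.foldl_nil,
      inner_foldl, Finset.sum_range_succ]
    push_cast
    ring_nf

lemma count_eq (xs : List Int) :
    count_even_sum_subsets xs = PySem.Int.mod (((evenC xs : Nat) : Int) - 1) (10 ^ 9 + 7) := by
  rw [count_even_sum_subsets]
  have h := outer_foldl xs xs.length 0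
  simp only [h, zero_add]
  have hsplit : evenC xs
      = ∑ r ∈ Finset.range xs.length,
          (PySem.List.combinations xs (r + 1)).countP (fun c => PySem.Int.mod c.sum 2 == 0) + 1 := by
    rw [evenC, Finset.sum_range_succ']
    rw [PySem.List.combinations_zero]
    rfl
  rw [hsplit]
  push_cast
  ring_nf

-- (a - 1) % M = (a % M - 1) % M for a modulus above 1
lemma sub_one_emod (a M : Int) (hM : 1 < M) : (a - 1) % M = (a % M - 1) % M := by
  rw [Int.sub_emod a 1 M, Int.emod_eq_of_lt (by norm_num) hM]

-- ===== VERDICT (by name: the statement is the Claim_ definition above) =====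
theorem count_even_sum_subsets_spec : Claim_equal_count_even_sum_subsets := by
  intro elements _
  show count_even_sum_subsets elements = count_even_sum_subsets_alt elements
  rw [count_eq, count_even_sum_subsets_alt]
  obtain ⟨he, _⟩ := evenC_oddC elements
  have hM : (0 : Int) < 10 ^ 9 + 7 := by norm_num
  simp only [PySem.Int.powMod, PySem.Int.mod_eq_emod_of_pos hM]
  by_cases h : elements.any (fun x => PySem.Int.mod x 2 != 0) = true
  · simp only [h, if_true] at he ⊢
    rw [he]
    push_cast
    rw [sub_one_emod _ _ (by norm_num)]
  · rw [Bool.not_eq_true] at h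
    simp only [h, if_false, Bool.false_eq_true] at he ⊢
    rw [he]
    push_cast
    rw [sub_one_emod _ _ (by norm_num)]
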